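-- pv_equiv track=rewrite | github.com/Viktor-Gostyaikin/algorithms | stack.py | calculate
-- ===== SOURCE A (Python) =====
-- class StackMax:
--     def __init__(self):
--         self.items = []
--         self.max_item = []
--     def push(self, item):
--         self.items.append(item)
--         if len(self.max_item) > 0:
--             if item > self.max_item[-1]:
--                 self.max_item.append(item)
--             else:
--                 self.max_item.append(self.max_item[-1])
--         else:
--             self.max_item.append(item)
--
--     def pop(self):
--         self.items.pop()
--         self.max_item.pop()
--
--     def get_max(self):
--         if len(self.items) == 0:
--             return 'None'
--         return self.max_item[-1]
--
-- def calculate(commands):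
--     result = ''
--     stack = StackMax()
--     for command in commands:
--         if command[0] == 'get_max':
--             result += f'{stack.get_max()}\n'
--         elif command[0] == 'pop':
--             if len(stack.items) == 0:
--                 result += 'error\n'
--             else:
--                 stack.pop()
--         elif command[0] == 'push':
--             stack.push(int(command[1]))
--     return result
-- ===== SOURCE B (Python) =====
-- def calculate(commands):
--     result = ''
--     stack = []
--     for command in commands:
--         op = command[0]
--         if op == 'push':
--             stack.append(int(command[1]))
--         elif op == 'pop':
--             if not stack:
--                 result += 'error\n'
--             else:
--                 stack.pop()
--         elif op == 'get_max':
--             result += ('None' if not stack else str(max(stack))) + '\n'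
--     return result
-- ===== Notes on version B (the rewrite author's own statement) =====
-- stated objective: simpler
-- what changed: B drops the StackMax class and its parallel running-max stack entirely: it keeps one plain list and recomputes the maximum by scanning the list with max() on each get_max, instead of maintaining a max invariant on every push/pop.
import Mathlib
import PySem

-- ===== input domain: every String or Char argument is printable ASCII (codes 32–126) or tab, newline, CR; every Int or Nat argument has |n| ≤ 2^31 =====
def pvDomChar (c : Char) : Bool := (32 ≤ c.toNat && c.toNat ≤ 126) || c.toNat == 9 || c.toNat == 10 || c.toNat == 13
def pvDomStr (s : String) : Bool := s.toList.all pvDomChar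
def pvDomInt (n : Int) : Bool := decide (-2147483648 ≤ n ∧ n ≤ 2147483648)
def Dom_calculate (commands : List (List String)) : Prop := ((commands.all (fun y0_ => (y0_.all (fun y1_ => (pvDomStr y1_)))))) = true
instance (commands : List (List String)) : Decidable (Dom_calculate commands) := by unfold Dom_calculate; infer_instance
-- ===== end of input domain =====

-- B drops the parallel running-max stack and the class: one plain list, max rescanned on demand (simpler, not faster).
-- Stacks are stored TOP-FIRST (Python append → cons, pop → tail, [-1] → head); `none` = the Python raised (excluded by Pre_).

-- ===== PORT A =====
-- one loop iteration of A: state = (result, items, max_item), stacks top-first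
def calcStepA (st : String × List Int × List Int) (command : List String) :
    Option (String × List Int × List Int) :=
  let (result, items, maxs) := st
  match PySem.List.pyGet? command 0 with
  | none => none                                  -- command[0] : IndexError
  | some c0 =>
    if c0 = "get_max" then
      if items.length = 0 then some (result ++ "None\n", items, maxs)
      else
        match maxs with                           -- max_item[-1]
        | [] => none                              -- IndexError (unreachable: lengths stay equal)
        | m :: _ => some (result ++ (PySem.Int.toStr m ++ "\n"), items, maxs)  -- f'{m}\n' appended
    else if c0 = "pop" then
      if items.length = 0 then some (result ++ "error\n", items, maxs)
      else some (result, items.tail, maxs.tail)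
    else if c0 = "push" then
      match PySem.List.pyGet? command 1 with
      | none => none                              -- command[1] : IndexError
      | some s =>
        match PySem.Int.ofStr? s with
        | none => none                            -- int(...) : ValueError
        | some item =>
          let maxs' :=
            match maxs with
            | m :: _ => (if item > m then item else m) :: maxs
            | [] => [item]
          some (result, item :: items, maxs')
    else some (result, items, maxs)

def calculate (commands : List (List String)) : String :=
  match commands.foldl (fun ost c => ost.bind (fun st => calcStepA st c))
      (some ("", ([], []))) with
  | some (result, _, _) => result
  | none => ""                                    -- Python raised; outside Pre_calculate

-- ===== PORT B =====
-- one loop iteration of B: state = (result, stack), stack top-first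
def calcStepB (st : String × List Int) (command : List String) :
    Option (String × List Int) :=
  let (result, stack) := st
  match PySem.List.pyGet? command 0 with
  | none => none                                  -- command[0] : IndexError
  | some op =>
    if op = "push" then
      match PySem.List.pyGet? command 1 with
      | none => none
      | some s =>
        match PySem.Int.ofStr? s with
        | none => none
        | some n => some (result, n :: stack)
    else if op = "pop" then
      if stack = [] then some (result ++ "error\n", stack)
      else some (result, stack.tail)
    else if op = "get_max" then
      some (result ++ ((match PySem.List.max? stack (fun y => y) with
                        | none => "None"          -- max? = none ↔ stack empty
                        | some m => PySem.Int.toStr m) ++ "\n"), stack)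
    else some (result, stack)

def calculate_alt (commands : List (List String)) : String :=
  match commands.foldl (fun ost c => ost.bind (fun st => calcStepB st c))
      (some ("", [])) with
  | some (result, _) => result
  | none => ""                                    -- Python raised; outside Pre_calculate

-- ===== PRECONDITION & SPEC =====
-- Pre_ excludes exactly the commands on which Python A raises: an empty command
-- (IndexError on command[0]) and a 'push' without a second entry parsing as an int
-- (IndexError / ValueError).  B raises on exactly the same inputs.
def Pre_calculate (commands : List (List String)) : Prop :=
  ∀ c ∈ commands, c ≠ [] ∧
    (c.headD "" = "push" →
      2 ≤ c.length ∧ (PySem.Int.ofStr? (c.getD 1 "")).isSome = true)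
instance (commands : List (List String)) : Decidable (Pre_calculate commands) := by
  unfold Pre_calculate; infer_instance

def pvWitness_calculate : List (List String) :=
  [["push", "3"], ["push", "-1"], ["get_max"], ["pop"], ["get_max"], ["pop"], ["pop"], ["get_max"]]

def Spec_calculate (commands : List (List String)) (out : String) : Prop := out = calculate_alt commands
instance (commands : List (List String)) (out : String) : Decidable (Spec_calculate commands out) := by unfold Spec_calculate; infer_instance

-- ===== CLAIM (what is proved, stated in full; the proofs are below) =====
def Claim_equal_calculate : Prop := ∀ (commands : List (List String)), Dom_calculate commands → Pre_calculate commands → Spec_calculate commands (calculate commands)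

-- ===== LEMMAS AND PROOFS =====

-- what A's max_item stack holds when items is the (top-first) item stack
def maxStackF : List Int → List Int
  | [] => []
  | x :: xs =>
    match maxStackF xs with
    | [] => [x]
    | m :: t => (if x > m then x else m) :: m :: t

theorem maxStackF_cons (x : Int) (xs : List Int) :
    maxStackF (x :: xs) = (xs.foldl max x) :: maxStackF xs := by
  induction xs generalizing x with
  | nil => simp [maxStackF]
  | cons y ys ih =>
    have h := ih y
    simp only [maxStackF] at *
    rw [h]
    have hm : (if x > ys.foldl max y then x else ys.foldl max y) = max x (ys.foldl max y) := by
      rcases le_or_gt x (ys.foldl max y) with h1 | h1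
      · simp [not_lt.mpr h1, max_eq_right h1]
      · simp [h1, max_eq_left (le_of_lt h1)]
    dsimp only
    rw [hm, List.foldl_cons, List.foldl_assoc]

theorem calcStep_agree (c : List String) (res : String) (items : List Int)
    (hc : c ≠ [] ∧ (c.headD "" = "push" →
      2 ≤ c.length ∧ (PySem.Int.ofStr? (c.getD 1 "")).isSome = true)) :
    calcStepA (res, items, maxStackF items) c =
      (calcStepB (res, items) c).map (fun p => (p.1, p.2, maxStackF p.2)) := by
  obtain ⟨hne, hpush⟩ := hc
  obtain - | ⟨op, rest⟩ := c
  · exact absurd rfl hne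
  have h0 : PySem.List.pyGet? (op :: rest) (0 : Int) = some op := by
    simp [PySem.List.pyGet?, PySem.List.pyIdx?]
  by_cases hg : op = "get_max"
  · subst hg
    simp only [calcStepA, calcStepB, h0, if_neg (by decide : ¬("get_max" = "push")),
      if_neg (by decide : ¬("get_max" = "pop"))]
    cases items with
    | nil =>
      simp only [PySem.List.max?, List.length_nil]
      rfl
    | cons x xs =>
      rw [maxStackF_cons]
      simp only [PySem.List.max?_id_cons, List.length_cons]
      exact congrArg some (Prod.ext rfl (Prod.ext rfl (maxStackF_cons x xs).symm))
  by_cases hp : op = "pop"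
  · subst hp
    simp only [calcStepA, calcStepB, h0, if_neg (by decide : ¬("pop" = "get_max")),
      if_neg (by decide : ¬("pop" = "push"))]
    cases items with
    | nil => simp
    | cons x xs =>
      rw [maxStackF_cons]
      simp
  by_cases hu : op = "push"
  · subst hu
    have hlen : 2 ≤ (("push" : String) :: rest).length := (hpush (by simp)).1
    have hsome := (hpush (by simp)).2
    obtain - | ⟨s, rest'⟩ := rest
    · simp at hlen
    have h1 : PySem.List.pyGet? (("push" : String) :: s :: rest') (1 : Int) = some s := by
      simp [PySem.List.pyGet?, PySem.List.pyIdx?]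
    simp only [List.getD, List.getElem?_cons_succ, List.getElem?_cons_zero, Option.getD_some] at hsome
    obtain ⟨n, hn⟩ := Option.isSome_iff_exists.mp hsome
    simp only [calcStepA, calcStepB, h0, h1, if_neg (by decide : ¬("push" = "get_max")),
      if_neg (by decide : ¬("push" = "pop")), hn]
    -- A's new max stack is exactly maxStackF (n :: items), by definition
    cases hms : maxStackF items with
    | nil => simp [maxStackF, hms]
    | cons m t => simp [maxStackF, hms]
  · simp [calcStepA, calcStepB, hg, hp, hu]

theorem foldl_bind_none {σ γ : Type} (f : σ → γ → Option σ) (cs : List γ) :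
    cs.foldl (fun ost c => ost.bind (fun st => f st c)) none = none := by
  induction cs <;> simp [*]

theorem fold_agree (cmds : List (List String)) (res : String) (items : List Int)
    (hpre : ∀ c ∈ cmds, c ≠ [] ∧ (c.headD "" = "push" →
      2 ≤ c.length ∧ (PySem.Int.ofStr? (c.getD 1 "")).isSome = true)) :
    cmds.foldl (fun ost c => ost.bind (fun st => calcStepA st c))
        (some (res, items, maxStackF items)) =
      (cmds.foldl (fun ost c => ost.bind (fun st => calcStepB st c))
        (some (res, items))).map (fun p => (p.1, p.2, maxStackF p.2)) := by
  induction cmds generalizing res items with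
  | nil => simp
  | cons c cs ih =>
    have hc := hpre c (by simp)
    have hstep := calcStep_agree c res items hc
    simp only [List.foldl_cons, Option.bind_some]
    rw [hstep]
    cases hB : calcStepB (res, items) c with
    | none => simp [foldl_bind_none]
    | some p =>
      obtain ⟨r', st'⟩ := p
      simp only [Option.map_some]
      exact ih r' st' (fun c' hc' => hpre c' (by simp [hc']))

-- ===== VERDICT (by name: the statement is the Claim_ definition above) =====
theorem calculate_spec : Claim_equal_calculate := by
  intro commands _hdom hpre
  unfold Spec_calculate calculate calculate_alt
  have h := fold_agree commands "" [] hpre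
  simp only [maxStackF] at h
  rw [h]
  cases commands.foldl (fun ost c => ost.bind (fun st => calcStepB st c)) (some ("", [])) with
  | none => rfl
  | some p => rfl
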